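-- pv_equiv track=rewrite | github.com/Oliver-Wilde/torah_codes | src/els_search.py | find_els_worker
-- ===== SOURCE A (Python) =====
-- def find_els_worker(args):
--     name, text, max_skip, start, end = args
--     positions = []
--     name_len = len(name)
--
--     for skip in range(1, max_skip + 1):
--         for pos in range(start, end):
--             match = True
--             for i in range(name_len):
--                 if pos + i * skip >= len(text) or text[pos + i * skip] != name[i]:
--                     match = False
--                     break
--             if match:
--                 positions.append((pos, skip))
--     return positions
-- ===== SOURCE B (Python) =====
-- def find_els_worker(args):
--     # Sieve formulation: per skip, start from all candidate positions and
--     # filter them letter by letter, instead of rescanning the name at each position.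
--     name, text, max_skip, start, end = args
--     L = len(text)
--     out = []
--     for skip in range(1, max_skip + 1):
--         cand = list(range(start, end))
--         for i, c in enumerate(name):
--             cand = [p for p in cand if p + i * skip < L and text[p + i * skip] == c]
--         out.extend((p, skip) for p in cand)
--     return out
-- ===== Notes on version B (the rewrite author's own statement) =====
-- stated objective: alternative
-- what changed: Per skip, B starts from the whole candidate-position list and filters it letter by letter (a sieve over positions, one comprehension per name letter), instead of A's per-position inner rescan of the name with break; A's IndexError inputs are excluded by Pre_.
import Mathlib
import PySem

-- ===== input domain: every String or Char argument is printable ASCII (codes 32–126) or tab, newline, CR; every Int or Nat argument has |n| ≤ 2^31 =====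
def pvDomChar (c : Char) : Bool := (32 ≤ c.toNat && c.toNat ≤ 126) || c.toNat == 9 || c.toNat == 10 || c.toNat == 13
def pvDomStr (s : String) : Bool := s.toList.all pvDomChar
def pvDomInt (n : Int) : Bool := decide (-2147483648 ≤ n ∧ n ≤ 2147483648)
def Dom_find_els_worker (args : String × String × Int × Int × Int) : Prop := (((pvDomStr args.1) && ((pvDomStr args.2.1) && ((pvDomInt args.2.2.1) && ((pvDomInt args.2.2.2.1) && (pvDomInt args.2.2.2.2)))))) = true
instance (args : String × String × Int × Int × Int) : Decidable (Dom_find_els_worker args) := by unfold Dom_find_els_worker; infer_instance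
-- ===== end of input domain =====

-- B replaces A's per-position rescan of the name by a per-skip candidate sieve
-- (filter the candidate-position list letter by letter); objective: alternative.

-- ===== PORT A =====
-- A's innermost loop `for i in range(name_len): if pos+i*skip >= len(text) or
-- text[pos+i*skip] != name[i]: match=False; break` as a fuel recursion over i.
def pvMatchA (nl tl : List Char) (pos skip : Int) : Nat → Int → Bool
  | 0, _ => true
  | fuel + 1, i =>
    if pos + i * skip ≥ (tl.length : Int)
        || !(PySem.List.pyGet? tl (pos + i * skip) == PySem.List.pyGet? nl i)
    then false
    else pvMatchA nl tl pos skip fuel (i + 1)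

def find_els_worker (args : String × String × Int × Int × Int) : List (Int × Int) :=
  let name := args.1
  let text := args.2.1
  let max_skip := args.2.2.1
  let start := args.2.2.2.1
  let end_ := args.2.2.2.2
  let nl := name.toList
  let tl := text.toList
  (PySem.List.pyRange 1 (max_skip + 1)).foldl (fun positions skip =>
    (PySem.List.pyRange start end_).foldl (fun positions2 pos =>
      if pvMatchA nl tl pos skip nl.length 0 then positions2 ++ [(pos, skip)] else positions2)
      positions) []

-- ===== PORT B =====
def find_els_worker_alt (args : String × String × Int × Int × Int) : List (Int × Int) :=
  let name := args.1
  let text := args.2.1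
  let max_skip := args.2.2.1
  let start := args.2.2.2.1
  let end_ := args.2.2.2.2
  let nl := name.toList
  let tl := text.toList
  let L : Int := tl.length
  (PySem.List.pyRange 1 (max_skip + 1)).foldl (fun out skip =>
    let cand :=
      (PySem.List.enumerate nl).foldl
        (fun c ic =>
          c.filter (fun p =>
            decide (p + ic.1 * skip < L)
              && (PySem.List.pyGet? tl (p + ic.1 * skip) == some ic.2)))
        (PySem.List.pyRange start end_)
    out ++ cand.map (fun p => (p, skip))) []

-- ===== PRECONDITION & SPEC =====
-- Pre_ excludes exactly the inputs on which A raises IndexError: a nonempty name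
-- with some skip tried, a nonempty position range, and start below -len(text)
-- (the first probed index text[start] is then out of range even after Python's
-- negative-index wraparound). A returns on every other input, including the
-- wraparound region -len(text) <= start < 0, which both ports model via pyGet?.
def Pre_find_els_worker (args : String × String × Int × Int × Int) : Prop :=
  args.1 = "" ∨ args.2.2.1 < 1 ∨ args.2.2.2.2 ≤ args.2.2.2.1
    ∨ -(args.2.1.toList.length : Int) ≤ args.2.2.2.1
instance (args : String × String × Int × Int × Int) : Decidable (Pre_find_els_worker args) := by
  unfold Pre_find_els_worker; infer_instance

def pvWitness_find_els_worker : (String × String × Int × Int × Int) :=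
  ("ab", "xaybabz", 3, 0, 7)

def Spec_find_els_worker (args : String × String × Int × Int × Int) (out : List (Int × Int)) : Prop := out = find_els_worker_alt args
instance (args : String × String × Int × Int × Int) (out : List (Int × Int)) : Decidable (Spec_find_els_worker args out) := by unfold Spec_find_els_worker; infer_instance

-- ===== CLAIM (what is proved, stated in full; the proofs are below) =====
def Claim_equal_find_els_worker : Prop := ∀ (args : String × String × Int × Int × Int), Dom_find_els_worker args → Pre_find_els_worker args → Spec_find_els_worker args (find_els_worker args)

-- ===== LEMMAS AND PROOFS =====

-- A fold of filters is one filter by the conjunction of all the predicates.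
theorem pv_foldl_filter {α β : Type} (g : β → α → Bool) (xs : List β) (r : List α) :
    xs.foldl (fun c e => c.filter (g e)) r
      = r.filter (fun a => xs.all (fun e => g e a)) := by
  induction xs generalizing r with
  | nil => simp
  | cons x xs ih =>
      simp only [List.foldl_cons, ih, List.filter_filter, List.all_cons]
      exact List.filter_congr (fun a _ => by rw [Bool.and_comm])

-- A's break-on-mismatch loop succeeds iff every index up to the fuel matches.
theorem pv_matchA_true_iff (nl tl : List Char) (pos skip : Int) (fuel : Nat) (i : Int) :
    pvMatchA nl tl pos skip fuel i = true
      ↔ ∀ k : Nat, k < fuel →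
          (decide (pos + (i + k) * skip < (tl.length : Int))
            && (PySem.List.pyGet? tl (pos + (i + k) * skip) == PySem.List.pyGet? nl (i + k))) = true := by
  induction fuel generalizing i with
  | zero => simp [pvMatchA]
  | succ f ih =>
      rw [pvMatchA]
      by_cases h : (pos + i * skip ≥ (tl.length : Int)
          || !(PySem.List.pyGet? tl (pos + i * skip) == PySem.List.pyGet? nl i)) = true
      · rw [if_pos h]
        simp only [Bool.false_eq_true, false_iff]
        intro hall
        have h0 := hall 0 (Nat.succ_pos f)
        simp only [Nat.cast_zero, add_zero, Bool.and_eq_true, decide_eq_true_eq] at h0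
        simp only [Bool.or_eq_true, decide_eq_true_eq, Bool.not_eq_true', beq_eq_false_iff_ne] at h
        rcases h with h | h
        · omega
        · exact h (by simpa using h0.2)
      · rw [if_neg h]
        simp only [Bool.or_eq_true, decide_eq_true_eq, Bool.not_eq_true', beq_eq_false_iff_ne,
          not_or, not_not] at h
        obtain ⟨h1, h2⟩ := h
        rw [ih (i + 1)]
        constructor
        · intro hall k hk
          cases k with
          | zero =>
              simp only [Nat.cast_zero, add_zero, Bool.and_eq_true, decide_eq_true_eq, beq_iff_eq]
              exact ⟨by omega, h2⟩
          | succ k' =>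
              have := hall k' (by omega)
              have harg : pos + (i + 1 + (k' : Int)) * skip = pos + (i + ((k' + 1 : Nat) : Int)) * skip := by
                push_cast; ring
              have harg2 : i + 1 + (k' : Int) = i + ((k' + 1 : Nat) : Int) := by push_cast; ring
              rwa [harg, harg2] at this
        · intro hall k hk
          have := hall (k + 1) (by omega)
          have harg : pos + (i + ((k + 1 : Nat) : Int)) * skip = pos + (i + 1 + (k : Int)) * skip := by
            push_cast; ring
          have harg2 : i + ((k + 1 : Nat) : Int) = i + 1 + (k : Int) := by push_cast; ring
          rwa [harg, harg2] at this

-- B's sieve predicate agrees pointwise with A's per-position loop.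
theorem pv_pred_eq (nl tl : List Char) (skip p : Int) :
    pvMatchA nl tl p skip nl.length 0
      = (PySem.List.enumerate nl).all (fun ic =>
          decide (p + ic.1 * skip < (tl.length : Int))
            && (PySem.List.pyGet? tl (p + ic.1 * skip) == some ic.2)) := by
  rw [Bool.eq_iff_iff, pv_matchA_true_iff, List.all_eq_true]
  rw [PySem.List.enumerate_eq_map_pyRange nl ' ', PySem.List.len, PySem.List.pyRange_zero_nat]
  constructor
  · intro hall ic hic
    simp only [List.mem_map, List.mem_range] at hic
    obtain ⟨j, ⟨k, hk, rfl⟩, rfl⟩ := hic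
    have := hall k hk
    have hget : PySem.List.pyGet? nl ((0 : Int) + (k : Int)) = some (PySem.List.pyGetD nl (k : Int) ' ') := by
      rw [zero_add, PySem.List.pyGet?_natCast, PySem.List.pyGetD_natCast,
        List.getElem?_eq_getElem hk, List.getD_eq_getElem _ _ hk]
    rw [hget] at this
    simpa using this
  · intro hall k hk
    have := hall ((k : Int), PySem.List.pyGetD nl (k : Int) ' ')
      (by simp only [List.mem_map, List.mem_range]; exact ⟨(k : Int), ⟨k, hk, rfl⟩, rfl⟩)
    have hget : PySem.List.pyGet? nl ((0 : Int) + (k : Int)) = some (PySem.List.pyGetD nl (k : Int) ' ') := by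
      rw [zero_add, PySem.List.pyGet?_natCast, PySem.List.pyGetD_natCast,
        List.getElem?_eq_getElem hk, List.getD_eq_getElem _ _ hk]
    rw [hget]
    simpa using this

-- Both per-skip bodies produce acc ++ the same filtered, tagged position list.
theorem pv_inner_eq (nl tl : List Char) (start end_ skip : Int) (acc : List (Int × Int)) :
    (PySem.List.pyRange start end_).foldl (fun positions2 pos =>
        if pvMatchA nl tl pos skip nl.length 0 then positions2 ++ [(pos, skip)] else positions2) acc
      = acc ++
        ((PySem.List.enumerate nl).foldl
            (fun c ic =>
              c.filter (fun p =>
                decide (p + ic.1 * skip < (tl.length : Int))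
                  && (PySem.List.pyGet? tl (p + ic.1 * skip) == some ic.2)))
            (PySem.List.pyRange start end_)).map (fun p => (p, skip)) := by
  rw [PySem.List.foldl_append_if (fun pos => pvMatchA nl tl pos skip nl.length 0)
      (fun pos => (pos, skip)) _ acc,
    pv_foldl_filter]
  congr 2
  exact List.filter_congr (fun p _ => pv_pred_eq nl tl skip p)

-- ===== VERDICT (by name: the statement is the Claim_ definition above) =====
theorem find_els_worker_spec : Claim_equal_find_els_worker := by
  intro args _ _
  unfold Spec_find_els_worker find_els_worker find_els_worker_alt
  obtain ⟨name, text, max_skip, start, end_⟩ := args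
  dsimp only
  have hfun : (fun (positions : List (Int × Int)) (skip : Int) =>
      (PySem.List.pyRange start end_).foldl (fun positions2 pos =>
        if pvMatchA name.toList text.toList pos skip name.toList.length 0
        then positions2 ++ [(pos, skip)] else positions2) positions)
    = (fun (out : List (Int × Int)) (skip : Int) =>
      out ++
        ((PySem.List.enumerate name.toList).foldl
            (fun c ic =>
              c.filter (fun p =>
                decide (p + ic.1 * skip < (text.toList.length : Int))
                  && (PySem.List.pyGet? text.toList (p + ic.1 * skip) == some ic.2)))
            (PySem.List.pyRange start end_)).map (fun p => (p, skip))) := by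
    funext acc skip
    exact pv_inner_eq name.toList text.toList start end_ skip acc
  rw [hfun]
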